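-- pv_equiv track=rewrite | github.com/facup94/EulerProjectPython | Scripts/54.py | three_of_a_kind_winner
-- ===== SOURCE A (Python) =====
-- card_values = ['2', '3', '4', '5', '6', '7', '8', '9', 'T', 'J', 'Q', 'K', 'A']
--
-- def high_card_winner(cards_p1, cards_p2):
--     p1_won = False
--     for i in range(len(cards_p1)-1,-1,-1):
--         if card_values.index(cards_p1[i]) > card_values.index(cards_p2[i]):
--             p1_won = True
--             break
--         if card_values.index(cards_p1[i]) < card_values.index(cards_p2[i]):
--             break
--     return p1_won
--
-- def three_of_a_kind_winner(cards_p1, cards_p2):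
--     ind_trio_p1 = 0
--     ind_trio_p2 = 0
--
--     values_set_p1 = list(set(cards_p1))
--     values_set_p2 = list(set(cards_p2))
--     for valueS in values_set_p1:
--         count = cards_p1.count(valueS)
--         if count == 3:
--             ind_trio_p1 = card_values.index(valueS)
--             break
--     for valueS in values_set_p2:
--         count = cards_p2.count(valueS)
--         if count == 3:
--             ind_trio_p2 = card_values.index(valueS)
--             break
--
--     if ind_trio_p1 > ind_trio_p2: return True
--     if ind_trio_p1 == ind_trio_p2:
--         return high_card_winner(cards_p1, cards_p2)
--     return False
-- ===== SOURCE B (Python) =====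
-- card_values = ['2', '3', '4', '5', '6', '7', '8', '9', 'T', 'J', 'Q', 'K', 'A']
--
--
-- def _trio_index(cards):
--     # sort the card indices once, then sweep maximal runs of equal values
--     s = sorted(card_values.index(c) for c in cards)
--     i, n = 0, len(s)
--     while i < n:
--         j = i + 1
--         while j < n and s[j] == s[i]:
--             j += 1
--         if j - i == 3:
--             return s[i]
--         i = j
--     return 0
--
--
-- def three_of_a_kind_winner(cards_p1, cards_p2):
--     t1 = _trio_index(cards_p1)
--     t2 = _trio_index(cards_p2)
--     if t1 != t2:
--         return t1 > t2
--     r1 = [card_values.index(c) for c in reversed(cards_p1)]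
--     r2 = [card_values.index(c) for c in reversed(cards_p2)]
--     return r1 > r2
-- ===== Notes on version B (the rewrite author's own statement) =====
-- stated objective: alternative
-- what changed: B finds the trio by sorting each hand's card indices once and sweeping maximal runs of equal values (returning the run of length exactly 3), instead of enumerating the distinct values of a set and counting each in the hand; the tie-break compares the reversed index lists lexicographically instead of an explicit index-descending loop with break flags.
-- outside the precondition, e.g. on three_of_a_kind_winner(['3', '3', '3'], ['x']): A returns True, B raises ValueError; on three_of_a_kind_winner(['3'], ['2', 'A']): A returns True, B returns False
import Mathlib
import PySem

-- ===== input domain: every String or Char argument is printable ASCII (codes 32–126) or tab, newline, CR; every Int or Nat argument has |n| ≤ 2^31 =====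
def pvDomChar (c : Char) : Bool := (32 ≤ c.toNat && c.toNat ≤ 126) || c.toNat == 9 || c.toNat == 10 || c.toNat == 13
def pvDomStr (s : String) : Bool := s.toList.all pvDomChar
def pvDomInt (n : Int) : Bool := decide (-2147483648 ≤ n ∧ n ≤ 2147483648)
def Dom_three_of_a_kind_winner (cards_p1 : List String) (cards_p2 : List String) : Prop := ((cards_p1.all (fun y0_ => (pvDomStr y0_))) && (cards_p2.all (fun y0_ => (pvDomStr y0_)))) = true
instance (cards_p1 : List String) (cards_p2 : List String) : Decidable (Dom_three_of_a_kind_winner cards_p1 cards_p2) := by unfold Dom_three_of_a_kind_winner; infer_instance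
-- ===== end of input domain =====

-- B finds the trio by sorting each hand's card indices once and sweeping runs of equal values,
-- and breaks ties by comparing the reversed index lists lexicographically (objective: alternative algorithm).

-- ===== PORT A =====
def cardValues : List String := ["2", "3", "4", "5", "6", "7", "8", "9", "T", "J", "Q", "K", "A"]

-- card_values.index(c); ValueError (c not in the table) is excluded by Pre_, so the default 0 is never used there
def cvIdx (c : String) : Int := ((PySem.List.index? cardValues c).getD 0 : Nat)

-- A's 'for valueS in values_set: count = cards.count(valueS); if count == 3: ind = index(valueS); break'
def trioLoopA (cards : List String) : List String → Int
  | [] => 0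
  | v :: rest =>
    if PySem.List.count cards v = 3 then cvIdx v else trioLoopA cards rest

-- A's high_card_winner loop body over 'range(len(cards_p1)-1, -1, -1)' with its two breaks
def hcLoopA (p1 p2 : List String) : List Int → Bool
  | [] => false
  | i :: rest =>
    if cvIdx (PySem.List.pyGetD p1 i "") > cvIdx (PySem.List.pyGetD p2 i "") then true
    else if cvIdx (PySem.List.pyGetD p1 i "") < cvIdx (PySem.List.pyGetD p2 i "") then false
    else hcLoopA p1 p2 rest

def high_card_winner (cards_p1 : List String) (cards_p2 : List String) : Bool :=
  hcLoopA cards_p1 cards_p2 (PySem.List.pyRange ((cards_p1.length : Int) - 1) (-1) (-1))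

def three_of_a_kind_winner (cards_p1 : List String) (cards_p2 : List String) : Bool :=
  let t1 := trioLoopA cards_p1 (PySem.Set.ofList cards_p1)
  let t2 := trioLoopA cards_p2 (PySem.Set.ofList cards_p2)
  if t1 > t2 then true
  else if t1 = t2 then high_card_winner cards_p1 cards_p2
  else false

-- ===== PORT B =====
-- the run sweep of Source B's _trio_index: a maximal run of equal values of length exactly 3 is the trio
def runSweep : List Int → Int
  | [] => 0
  | x :: xs =>
    if (xs.takeWhile (fun y => y == x)).length + 1 = 3 then x
    else runSweep (xs.dropWhile (fun y => y == x))
termination_by s => s.length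
decreasing_by
  simp only [List.length_cons]
  exact Nat.lt_succ_of_le (List.length_dropWhile_le _ _)

def trioIndexB (cards : List String) : Int :=
  runSweep (PySem.List.sorted (cards.map cvIdx) (fun x => x) false)

-- Python's list 'r1 > r2' (lexicographic)
def lexGT : List Int → List Int → Bool
  | [], _ => false
  | _ :: _, [] => true
  | a :: as, b :: bs => if a > b then true else if a < b then false else lexGT as bs

def three_of_a_kind_winner_alt (cards_p1 : List String) (cards_p2 : List String) : Bool :=
  let t1 := trioIndexB cards_p1
  let t2 := trioIndexB cards_p2
  if t1 ≠ t2 then decide (t1 > t2)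
  else lexGT (cards_p1.reverse.map cvIdx) (cards_p2.reverse.map cvIdx)

-- ===== PRECONDITION & SPEC =====
-- Pre_ excludes: hands containing a string outside card_values (A usually raises ValueError and returns a value
-- only when its lazy evaluation never reaches the bad card, where B raises); hands of unequal length (A raises
-- IndexError on ties with the first hand longer, and otherwise returns an accidental truncated comparison); and
-- hands with two distinct values each appearing exactly three times (A's answer depends on set iteration order).
def Pre_three_of_a_kind_winner (cards_p1 : List String) (cards_p2 : List String) : Prop :=
  (∀ c ∈ cards_p1, c ∈ cardValues) ∧ (∀ c ∈ cards_p2, c ∈ cardValues) ∧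
  cards_p1.length = cards_p2.length ∧
  (∀ v ∈ cards_p1, ∀ w ∈ cards_p1, cards_p1.count v = 3 → cards_p1.count w = 3 → v = w) ∧
  (∀ v ∈ cards_p2, ∀ w ∈ cards_p2, cards_p2.count v = 3 → cards_p2.count w = 3 → v = w)

instance (cards_p1 : List String) (cards_p2 : List String) : Decidable (Pre_three_of_a_kind_winner cards_p1 cards_p2) := by
  unfold Pre_three_of_a_kind_winner; infer_instance

def pvWitness_three_of_a_kind_winner : List String × List String :=
  (["2", "3", "A", "A", "A"], ["5", "5", "5", "K", "2"])

def Spec_three_of_a_kind_winner (cards_p1 : List String) (cards_p2 : List String) (out : Bool) : Prop := out = three_of_a_kind_winner_alt cards_p1 cards_p2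
instance (cards_p1 : List String) (cards_p2 : List String) (out : Bool) : Decidable (Spec_three_of_a_kind_winner cards_p1 cards_p2 out) := by unfold Spec_three_of_a_kind_winner; infer_instance

-- ===== CLAIM (what is proved, stated in full; the proofs are below) =====
def Claim_equal_three_of_a_kind_winner : Prop := ∀ (cards_p1 : List String) (cards_p2 : List String), Dom_three_of_a_kind_winner cards_p1 cards_p2 → Pre_three_of_a_kind_winner cards_p1 cards_p2 → Spec_three_of_a_kind_winner cards_p1 cards_p2 (three_of_a_kind_winner cards_p1 cards_p2)

-- ===== LEMMAS AND PROOFS =====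

theorem cvIdx_inj {x v : String} (hx : x ∈ cardValues) (hv : v ∈ cardValues)
    (h : cvIdx x = cvIdx v) : x = v := by
  fin_cases hx <;> fin_cases hv <;> revert h <;> decide

-- in a sorted list bounded below by x, the x's form a prefix
theorem sorted_run (x : Int) : ∀ (xs : List Int), (∀ y ∈ xs, x ≤ y) → xs.Pairwise (· ≤ ·) →
    (xs.takeWhile (fun y => y == x)).length = xs.count x ∧
    (xs.dropWhile (fun y => y == x)).count x = 0 := by
  intro xs
  induction xs with
  | nil => simp
  | cons y ys ih =>
    intro hb hp
    rcases List.pairwise_cons.mp hp with ⟨hby, hpys⟩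
    by_cases hxy : y = x
    · subst hxy
      have := ih (fun z hz => hby z hz) hpys
      simp [List.takeWhile, List.dropWhile, this.1, this.2]
    · have hlt : x < y := lt_of_le_of_ne (hb y (by simp)) (fun e => hxy e.symm)
      have hbe : (y == x) = false := by simp [hxy]
      have hnot : x ∉ y :: ys := by
        intro hmem
        rcases List.mem_cons.mp hmem with h1 | h1
        · exact absurd h1.symm hxy
        · exact absurd (hby x h1) (not_le.mpr hlt)
      have hc0 : (y :: ys).count x = 0 := List.count_eq_zero.mpr hnot
      constructor
      · simp [hbe, hc0]
      · simp [hbe, hc0]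

theorem count_decomp (k x : Int) (xs : List Int) :
    (x :: xs).count k =
      (if k = x then (xs.takeWhile (fun y => y == x)).length + 1 else 0) +
      (xs.dropWhile (fun y => y == x)).count k := by
  have htd : xs.takeWhile (fun y => y == x) ++ xs.dropWhile (fun y => y == x) = xs :=
    List.takeWhile_append_dropWhile
  have ht : (xs.takeWhile (fun y => y == x)).count k =
      if k = x then (xs.takeWhile (fun y => y == x)).length else 0 := by
    by_cases hk : k = x
    · subst hk
      refine if_pos rfl ▸ ?_
      exact List.count_eq_length.mpr (fun b hb => by
        have := List.mem_takeWhile_imp hb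
        simpa using (beq_iff_eq.mp (by simpa using this)).symm)
    · rw [if_neg hk]
      refine List.count_eq_zero.mpr ?_
      intro hmem
      have := List.mem_takeWhile_imp hmem
      exact hk (by simpa using this)
  calc (x :: xs).count k = xs.count k + (if k = x then 1 else 0) := by
        rw [List.count_cons]
        by_cases hk : k = x
        · simp [hk]
        · simp [hk, Ne.symm hk]
    _ = _ := by
        conv_lhs => rw [← htd]
        rw [List.count_append, ht]
        by_cases hk : k = x <;> simp [hk] <;> ring

theorem dropWhile_pairwise (x : Int) (xs : List Int) (hp : xs.Pairwise (· ≤ ·)) :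
    (xs.dropWhile (fun y => y == x)).Pairwise (· ≤ ·) :=
  hp.sublist (List.dropWhile_sublist _)

theorem runSweep_none : ∀ (n : Nat) (s : List Int), s.length ≤ n → s.Pairwise (· ≤ ·) →
    (∀ k : Int, s.count k ≠ 3) → runSweep s = 0 := by
  intro n
  induction n with
  | zero =>
    intro s hn _ _
    have : s = [] := List.eq_nil_of_length_eq_zero (Nat.le_zero.mp hn)
    subst this; rw [runSweep]
  | succ n ih =>
    intro s hn hp hc
    match s with
    | [] => rw [runSweep]
    | x :: xs =>
      rcases List.pairwise_cons.mp hp with ⟨hbx, hpxs⟩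
      have hrun := sorted_run x xs hbx hpxs
      have hcx : (x :: xs).count x = (xs.takeWhile (fun y => y == x)).length + 1 := by
        rw [count_decomp x x xs, if_pos rfl, hrun.2]
      have hcond : ¬ ((xs.takeWhile (fun y => y == x)).length + 1 = 3) := by
        rw [← hcx]; exact hc x
      rw [runSweep, if_neg hcond]
      refine ih _ ?_ (dropWhile_pairwise x xs hpxs) ?_
      · have := List.length_dropWhile_le (fun y => y == x) xs
        have hxs : xs.length ≤ n := by
          have := hn; simp only [List.length_cons] at this; omega
        omega
      · intro k hk3
        by_cases hkx : k = x
        · subst hkx; rw [hrun.2] at hk3; omega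
        · have := count_decomp k x xs
          rw [if_neg hkx] at this
          exact hc k (by omega)

theorem runSweep_some : ∀ (n : Nat) (s : List Int) (v : Int), s.length ≤ n →
    s.Pairwise (· ≤ ·) → s.count v = 3 → (∀ k : Int, s.count k = 3 → k = v) →
    runSweep s = v := by
  intro n
  induction n with
  | zero =>
    intro s v hn _ hv _
    have : s = [] := List.eq_nil_of_length_eq_zero (Nat.le_zero.mp hn)
    subst this; simp at hv
  | succ n ih =>
    intro s v hn hp hv huniq
    match s with
    | [] => simp at hv
    | x :: xs =>
      rcases List.pairwise_cons.mp hp with ⟨hbx, hpxs⟩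
      have hrun := sorted_run x xs hbx hpxs
      have hcx : (x :: xs).count x = (xs.takeWhile (fun y => y == x)).length + 1 := by
        rw [count_decomp x x xs, if_pos rfl, hrun.2]
      by_cases hcond : (xs.takeWhile (fun y => y == x)).length + 1 = 3
      · rw [runSweep, if_pos hcond]
        exact huniq x (by omega)
      · rw [runSweep, if_neg hcond]
        have hvx : v ≠ x := by
          intro e; subst e; omega
        have hdk : ∀ k : Int, k ≠ x →
            (xs.dropWhile (fun y => y == x)).count k = (x :: xs).count k := by
          intro k hk
          have := count_decomp k x xs
          rw [if_neg hk] at this; omega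
        refine ih _ v ?_ (dropWhile_pairwise x xs hpxs) ?_ ?_
        · have := List.length_dropWhile_le (fun y => y == x) xs
          have hxs : xs.length ≤ n := by
            have := hn; simp only [List.length_cons] at this; omega
          omega
        · rw [hdk v hvx]; exact hv
        · intro k hk3
          by_cases hkx : k = x
          · subst hkx; rw [hrun.2] at hk3; omega
          · exact huniq k (by rw [← hdk k hkx]; exact hk3)

theorem trioA_none (cards : List String) : ∀ (l : List String),
    (∀ x ∈ l, cards.count x ≠ 3) → trioLoopA cards l = 0 := by
  intro l
  induction l with
  | nil => intro _; rfl
  | cons v rest ih =>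
    intro h
    have hv : cards.count v ≠ 3 := h v (by simp)
    rw [trioLoopA, if_neg (by rw [PySem.List.count_eq]; exact hv)]
    exact ih (fun x hx => h x (by simp [hx]))

theorem trioA_some (cards : List String) (v : String) : ∀ (l : List String),
    v ∈ l → cards.count v = 3 → (∀ w ∈ l, cards.count w = 3 → w = v) →
    trioLoopA cards l = cvIdx v := by
  intro l
  induction l with
  | nil => intro h; simp at h
  | cons w rest ih =>
    intro hvl hv3 huniq
    by_cases hw3 : cards.count w = 3
    · have : w = v := huniq w (by simp) hw3
      subst this
      rw [trioLoopA, if_pos (by rw [PySem.List.count_eq]; exact hw3)]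
    · rw [trioLoopA, if_neg (by rw [PySem.List.count_eq]; exact hw3)]
      have hvrest : v ∈ rest := by
        rcases List.mem_cons.mp hvl with h1 | h1
        · exact absurd (h1 ▸ hv3) hw3
        · exact h1
      exact ih hvrest hv3 (fun x hx h3 => huniq x (by simp [hx]) h3)

theorem count_map_cvIdx (cards : List String) (hall : ∀ c ∈ cards, c ∈ cardValues)
    (v : String) (hv : v ∈ cardValues) :
    (cards.map cvIdx).count (cvIdx v) = cards.count v := by
  show List.countP (· == cvIdx v) (cards.map cvIdx) = List.countP (· == v) cards
  rw [List.countP_map]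
  refine List.countP_congr ?_
  intro x hx
  simp only [Function.comp_apply, beq_iff_eq]
  constructor
  · intro h; exact cvIdx_inj (hall x hx) hv h
  · intro h; rw [h]

theorem exists_of_count_map_pos (cards : List String) (k : Int)
    (h : 0 < (cards.map cvIdx).count k) : ∃ x ∈ cards, cvIdx x = k := by
  have hk : k ∈ cards.map cvIdx := List.count_pos_iff.mp h
  rcases List.mem_map.mp hk with ⟨x, hx, he⟩
  exact ⟨x, hx, he⟩

theorem trio_eq (cards : List String) (hall : ∀ c ∈ cards, c ∈ cardValues)
    (huniq : ∀ v ∈ cards, ∀ w ∈ cards, cards.count v = 3 → cards.count w = 3 → v = w) :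
    trioLoopA cards (PySem.Set.ofList cards) = trioIndexB cards := by
  have hperm : (PySem.List.sorted (cards.map cvIdx) (fun x => x) false).Perm (cards.map cvIdx) :=
    PySem.List.sorted_perm _ _ _
  have hsort : (PySem.List.sorted (cards.map cvIdx) (fun x => x) false).Pairwise (· ≤ ·) := by
    simpa using PySem.List.sorted_pairwise (cards.map cvIdx) (fun x => x)
  have hcnt : ∀ k : Int, (PySem.List.sorted (cards.map cvIdx) (fun x => x) false).count k
      = (cards.map cvIdx).count k := fun k => hperm.count_eq k
  by_cases hex : ∃ v ∈ cards, cards.count v = 3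
  · rcases hex with ⟨v, hvmem, hv3⟩
    have hvCV : v ∈ cardValues := hall v hvmem
    have hA : trioLoopA cards (PySem.Set.ofList cards) = cvIdx v := by
      refine trioA_some cards v _ ?_ hv3 ?_
      · exact (PySem.Set.mem_ofList _ _).mpr hvmem
      · intro w hw h3
        have hwc : w ∈ cards := (PySem.Set.mem_ofList _ _).mp hw
        exact huniq w hwc v hvmem h3 hv3
    have hB : trioIndexB cards = cvIdx v := by
      unfold trioIndexB
      refine runSweep_some _ _ (cvIdx v) le_rfl hsort ?_ ?_
      · rw [hcnt, count_map_cvIdx cards hall v hvCV]; exact hv3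
      · intro k hk3
        have hpos : 0 < (cards.map cvIdx).count k := by rw [← hcnt]; omega
        rcases exists_of_count_map_pos cards k hpos with ⟨x, hx, he⟩
        subst he
        have : cards.count x = 3 := by
          rw [← count_map_cvIdx cards hall x (hall x hx), ← hcnt]; exact hk3
        rw [huniq x hx v hvmem this hv3]
    rw [hA, hB]
  · simp only [not_exists, not_and] at hex
    have hA : trioLoopA cards (PySem.Set.ofList cards) = 0 :=
      trioA_none cards _ (fun x hx => hex x ((PySem.Set.mem_ofList _ _).mp hx))
    have hB : trioIndexB cards = 0 := by
      unfold trioIndexB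
      refine runSweep_none _ _ le_rfl hsort ?_
      intro k hk3
      have hpos : 0 < (cards.map cvIdx).count k := by rw [← hcnt]; omega
      rcases exists_of_count_map_pos cards k hpos with ⟨x, hx, he⟩
      subst he
      have : cards.count x = 3 := by
        rw [← count_map_cvIdx cards hall x (hall x hx), ← hcnt]; exact hk3
      exact hex x hx this
    rw [hA, hB]

theorem hc_eq : ∀ (k : Nat) (p1 p2 : List String), k ≤ p1.length → k ≤ p2.length →
    hcLoopA p1 p2 (PySem.List.pyRange ((k : Int) - 1) (-1) (-1)) =
      lexGT ((p1.take k).reverse.map cvIdx) ((p2.take k).reverse.map cvIdx) := by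
  intro k
  induction k with
  | zero =>
    intro p1 p2 _ _
    rw [PySem.List.pyRange_neg_one_eq_nil (by norm_num)]
    simp [hcLoopA, lexGT]
  | succ k ih =>
    intro p1 p2 h1 h2
    have hk1 : k < p1.length := h1
    have hk2 : k < p2.length := h2
    have hr : ((k + 1 : Nat) : Int) - 1 = (k : Int) := by push_cast; ring
    rw [hr, PySem.List.pyRange_neg_one_cons (by omega)]
    have hg1 : PySem.List.pyGetD p1 ((k : Nat) : Int) "" = p1[k] := by
      simp [List.getD_eq_getElem?_getD, hk1]
    have hg2 : PySem.List.pyGetD p2 ((k : Nat) : Int) "" = p2[k] := by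
      simp [List.getD_eq_getElem?_getD, hk2]
    have ht1 : (p1.take (k + 1)).reverse = p1[k] :: (p1.take k).reverse := by
      rw [List.take_add_one, List.getElem?_eq_getElem hk1]
      simp
    have ht2 : (p2.take (k + 1)).reverse = p2[k] :: (p2.take k).reverse := by
      rw [List.take_add_one, List.getElem?_eq_getElem hk2]
      simp
    rw [hcLoopA, hg1, hg2, ht1, ht2]
    simp only [List.map_cons, lexGT]
    by_cases hgt : cvIdx p1[k] > cvIdx p2[k]
    · simp [hgt]
    · by_cases hlt : cvIdx p1[k] < cvIdx p2[k]
      · simp [hgt, hlt]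
      · simp only [if_neg hgt, if_neg hlt]
        exact ih p1 p2 (Nat.le_of_lt hk1) (Nat.le_of_lt hk2)

-- ===== VERDICT (by name: the statement is the Claim_ definition above) =====
theorem three_of_a_kind_winner_spec : Claim_equal_three_of_a_kind_winner := by
  intro p1 p2 _ hpre
  obtain ⟨hall1, hall2, hlen, hu1, hu2⟩ := hpre
  unfold Spec_three_of_a_kind_winner three_of_a_kind_winner three_of_a_kind_winner_alt
  rw [trio_eq p1 hall1 hu1, trio_eq p2 hall2 hu2]
  set t1 := trioIndexB p1
  set t2 := trioIndexB p2
  have hhc : high_card_winner p1 p2 =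
      lexGT (p1.reverse.map cvIdx) (p2.reverse.map cvIdx) := by
    unfold high_card_winner
    have h := hc_eq p1.length p1 p2 le_rfl (le_of_eq hlen)
    have h2 : p2.take p1.length = p2 := by rw [hlen, List.take_length]
    rw [List.take_length, h2] at h
    exact h
  by_cases heq : t1 = t2
  · simp [heq, hhc]
  · by_cases hgt : t1 > t2
    · simp [heq, hgt]
    · simp [heq, hgt]
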